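-- pv_equiv track=rewrite | github.com/boehmrya/cs1_projects | hw3/hw3a.py | farthestConsecutivePrimes
-- ===== SOURCE A (Python) =====
-- import math
--
-- def isPrime(n):
--     factor = 2 # initial value of possible factor
--     factorUpperBound = math.sqrt(n) # the largest possible factor we need to test is sqrt(n)
--
--     # loop to generate and test all possible factors
--     while (factor <= factorUpperBound):
--         # test if n is evenly divisible by factor
--         if (n % factor == 0):
--             return False
--
--         factor = factor + 1
--
--     return True
--
-- def farthestConsecutivePrimes(n):
--     primes = []
--     i = 2
--     # build a list of all primes less then or equal to n
--     while i <= n: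
--         if isPrime(i):
--             primes.append(i)
--         i += 1
--
--     # find the two farthest consecutive primes
--     j = 0
--     maxDistance = 0
--     lowPrime = 0
--     highPrime = 0
--     while j < (len(primes) - 1):
--         distance = primes[j + 1] - primes[j]
--         if distance > maxDistance:
--             maxDistance = distance
--             lowPrime = primes[j]
--             highPrime = primes[j + 1]
--         j += 1
--
--     return [lowPrime, highPrime]
-- ===== SOURCE B (Python) =====
-- def farthestConsecutivePrimes(n):
--     # Sieve of Eratosthenes (boolean composite table), then a single
--     # prev-tracking scan for the widest gap between consecutive primes.
--     if n < 2:
--         return [0, 0]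
--     comp = [False] * (n + 1)
--     for i in range(2, n + 1):
--         if not comp[i]:
--             for m in range(2 * i, n + 1, i):
--                 comp[m] = True
--     prev = -1
--     maxDistance = 0
--     lowPrime = 0
--     highPrime = 0
--     for i in range(2, n + 1):
--         if not comp[i]:
--             if prev != -1 and i - prev > maxDistance:
--                 maxDistance = i - prev
--                 lowPrime = prev
--                 highPrime = i
--             prev = i
--     return [lowPrime, highPrime]
-- ===== Notes on version B (the rewrite author's own statement) =====
-- stated objective: faster
-- what changed: Replaces per-number trial division (sqrt(i) trial divisors for every i up to n) by a sieve of Eratosthenes over a boolean composite table followed by a single prev-tracking scan of the prime gaps.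
import Mathlib
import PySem

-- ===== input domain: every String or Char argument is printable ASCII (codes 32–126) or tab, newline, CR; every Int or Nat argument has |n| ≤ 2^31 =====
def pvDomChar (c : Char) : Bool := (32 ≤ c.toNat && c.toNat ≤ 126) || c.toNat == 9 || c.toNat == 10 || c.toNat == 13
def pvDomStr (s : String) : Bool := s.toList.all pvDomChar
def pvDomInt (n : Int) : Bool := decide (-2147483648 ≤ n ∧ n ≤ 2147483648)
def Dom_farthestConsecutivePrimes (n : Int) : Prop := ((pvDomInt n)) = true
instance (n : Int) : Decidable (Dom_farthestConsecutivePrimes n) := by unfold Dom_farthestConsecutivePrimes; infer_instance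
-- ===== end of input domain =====

-- B replaces A's per-number trial division with a sieve of Eratosthenes (set of composites)
-- plus a single prev-tracking scan for the widest gap; the return value is proved equal.


-- ===== PORT A =====
-- 'while factor <= math.sqrt(n)': for an integer factor and 2 ≤ n ≤ 2^31 (isPrime's actual
-- arguments) the correctly rounded double sqrt makes this test exactly 'factor * factor ≤ n',
-- which is how it is ported.
def pyIsPrimeLoop (k factor : Int) : Bool :=
  if h : factor * factor ≤ k then
    if PySem.Int.mod k factor == 0 then false
    else pyIsPrimeLoop k (factor + 1)
  else true
termination_by (k + 1 - factor).toNat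
decreasing_by
  have hf : factor ≤ factor * factor := by nlinarith [sq_nonneg factor, sq_nonneg (factor - 1)]
  omega

def pyIsPrime (k : Int) : Bool := pyIsPrimeLoop k 2

-- 'while i <= n: if isPrime(i): primes.append(i)'
def buildPrimes (n i : Int) (primes : List Int) : List Int :=
  if i ≤ n then
    buildPrimes n (i + 1) (if pyIsPrime i then primes ++ [i] else primes)
  else primes
termination_by (n + 1 - i).toNat

-- 'while j < len(primes) - 1: …' (indices j, j+1 are always in range; the default 0 of pyGetD is never used)
def gapLoop (primes : List Int) (j maxDistance lowPrime highPrime : Int) : List Int :=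
  if h : j < (primes.length : Int) - 1 then
    let distance := PySem.List.pyGetD primes (j + 1) 0 - PySem.List.pyGetD primes j 0
    if maxDistance < distance then
      gapLoop primes (j + 1) distance (PySem.List.pyGetD primes j 0) (PySem.List.pyGetD primes (j + 1) 0)
    else gapLoop primes (j + 1) maxDistance lowPrime highPrime
  else [lowPrime, highPrime]
termination_by ((primes.length : Int) - j).toNat

def farthestConsecutivePrimes (n : Int) : List Int :=
  gapLoop (buildPrimes n 2 []) 0 0 0 0

-- ===== PORT B =====
-- comp is Python's list of booleans; every index read or written is 0 ≤ i ≤ n, within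
-- bounds, so Array.getD/.setIfInBounds (with .toNat) are exact ports of comp[i].
-- 'if not comp[i]: for m in range(2*i, n+1, i): comp[m] = True'
def sieveStep (n : Int) (comp : Array Bool) (i : Int) : Array Bool :=
  if comp.getD i.toNat false then comp
  else (PySem.List.pyRange (2 * i) (n + 1) i).foldl (fun c m => c.setIfInBounds m.toNat true) comp

def sieveComp (n : Int) : Array Bool :=
  (PySem.List.pyRange 2 (n + 1) 1).foldl (sieveStep n) (Array.replicate (n + 1).toNat false)

-- fold state = (prev, maxDistance, lowPrime, highPrime)
def gapStep (comp : Array Bool) (st : Int × Int × Int × Int) (i : Int) :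
    Int × Int × Int × Int :=
  if comp.getD i.toNat false then st
  else if st.1 ≠ -1 ∧ st.2.1 < i - st.1 then (i, i - st.1, st.1, i)
  else (i, st.2.1, st.2.2.1, st.2.2.2)

def farthestConsecutivePrimes_alt (n : Int) : List Int :=
  if n < 2 then [0, 0]
  else
    let comp := sieveComp n
    let st := (PySem.List.pyRange 2 (n + 1) 1).foldl (gapStep comp) (-1, 0, 0, 0)
    [st.2.2.1, st.2.2.2]

-- ===== PRECONDITION & SPEC =====
def Spec_farthestConsecutivePrimes (n : Int) (out : List Int) : Prop := out = farthestConsecutivePrimes_alt n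
instance (n : Int) (out : List Int) : Decidable (Spec_farthestConsecutivePrimes n out) := by unfold Spec_farthestConsecutivePrimes; infer_instance

-- ===== CLAIM (what is proved, stated in full; the proofs are below) =====
def Claim_equal_farthestConsecutivePrimes : Prop := ∀ (n : Int), Dom_farthestConsecutivePrimes n → Spec_farthestConsecutivePrimes n (farthestConsecutivePrimes n)

-- ===== LEMMAS AND PROOFS =====

-- the primes 2..n, as both programs enumerate them
def primesUpTo (n : Int) : List Int :=
  (PySem.List.pyRange 2 (n + 1) 1).filter (fun i => pyIsPrime i)

-- the common gap scan, expressed structurally on the list of primes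
def pairFold : List Int → Int → Int → Int → List Int
  | [], _, lo, hi => [lo, hi]
  | [_], _, lo, hi => [lo, hi]
  | x :: y :: t, m, lo, hi =>
      if m < y - x then pairFold (y :: t) (y - x) x y else pairFold (y :: t) m lo hi

-- "x is a product of two factors ≥ 2, and x ≤ n" — exactly what the sieve marks
def Marked (n x : Int) : Prop := ∃ a b : Int, 2 ≤ a ∧ 2 ≤ b ∧ x = a * b ∧ x ≤ n

-- B's gap update at a prime (the else-branch of gapStep)
-- state = (prev, maxDistance, lowPrime, highPrime)
def gapUpd (st : Int × Int × Int × Int) (i : Int) : Int × Int × Int × Int :=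
  if st.1 ≠ -1 ∧ st.2.1 < i - st.1 then (i, i - st.1, st.1, i)
  else (i, st.2.1, st.2.2.1, st.2.2.2)

theorem pyIsPrimeLoop_eq_true_iff (k f : Int) (hf0 : 0 ≤ f) :
    pyIsPrimeLoop k f = true ↔ ∀ g, f ≤ g → g * g ≤ k → ¬ (g ∣ k) := by
  fun_induction pyIsPrimeLoop k f
  case case1 f h hmod =>
    simp only [Bool.false_eq_true, false_iff]
    intro hall
    exact hall f le_rfl h ((PySem.Int.mod_eq_zero_iff_dvd k f).mp (by simpa using hmod))
  case case2 f h hmod ih =>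
    rw [ih (by omega)]
    constructor
    · intro hall g hg hgg hdvd
      rcases eq_or_lt_of_le hg with heq | hlt
      · subst heq
        exact (by simpa using hmod : ¬ PySem.Int.mod k f = 0) ((PySem.Int.mod_eq_zero_iff_dvd k f).mpr hdvd)
      · exact hall g (by omega) hgg hdvd
    · intro hall g hg hgg hdvd
      exact hall g (by omega) hgg hdvd
  case case3 f h =>
    simp only [true_iff]
    intro g hg hgg hdvd
    have : f * f ≤ g * g := by nlinarith
    omega
theorem pyIsPrime_eq_false_iff (k : Int) (hk : 2 ≤ k) :
    pyIsPrime k = false ↔ ∃ a b : Int, 2 ≤ a ∧ 2 ≤ b ∧ k = a * b := by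
  unfold pyIsPrime
  rw [← Bool.not_eq_true, pyIsPrimeLoop_eq_true_iff k 2 (by omega)]
  push Not
  constructor
  · rintro ⟨g, hg, hgg, hdvd⟩
    obtain ⟨c, hc⟩ := hdvd
    refine ⟨g, c, hg, ?_, hc⟩
    nlinarith
  · rintro ⟨a, b, ha, hb, hab⟩
    rcases le_total a b with hle | hle
    · exact ⟨a, ha, by nlinarith, ⟨b, hab⟩⟩
    · exact ⟨b, hb, by nlinarith, ⟨a, by linarith [hab, mul_comm a b]⟩⟩
theorem buildPrimes_eq (n i : Int) (acc : List Int) :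
    buildPrimes n i acc = acc ++ (PySem.List.pyRange i (n + 1) 1).filter (fun j => pyIsPrime j) := by
  fun_induction buildPrimes n i acc
  case case1 i acc h ih =>
    by_cases hp : pyIsPrime i
    all_goals
      simp only [hp, Bool.false_eq_true, dite_true, dite_false, if_true, if_false] at ih ⊢
      rw [ih, show PySem.List.pyRange i (n+1) 1 = i :: PySem.List.pyRange (i+1) (n+1) 1 from PySem.List.pyRange_one_cons (by omega)]
      simp [hp]
  case case2 i acc h =>
    rw [PySem.List.pyRange_one_eq_nil (by omega)]
    simp

theorem gapLoop_eq_pairFold (l : List Int) (j m lo hi : Int) :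
    0 ≤ j → gapLoop l j m lo hi = pairFold (l.drop j.toNat) m lo hi := by
  fun_induction gapLoop l j m lo hi
  case case1 j m lo hi h d hlt ih =>
    intro hj
    have h1 : j.toNat < l.length := by omega
    have h2 : j.toNat + 1 < l.length := by omega
    have hg1 : PySem.List.pyGetD l j 0 = l[j.toNat] := PySem.List.pyGetD_eq_getElem l 0 hj (by omega)
    have hg2 : PySem.List.pyGetD l (j + 1) 0 = l[j.toNat + 1] := by
      have := PySem.List.pyGetD_eq_getElem l (i := j + 1) 0 (by omega) (by omega)
      simpa [show (j + 1).toNat = j.toNat + 1 by omega] using this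
    have hdv : d = l[j.toNat + 1] - l[j.toNat] := by simp only [d, hg1, hg2]
    rw [ih (by omega), List.drop_eq_getElem_cons h1, List.drop_eq_getElem_cons h2,
        show (j + 1).toNat = j.toNat + 1 by omega, List.drop_eq_getElem_cons h2]
    rw [hdv] at hlt ⊢
    rw [hg1, hg2]
    simp only [pairFold]
    rw [if_pos hlt]
  case case2 j m lo hi h d hge ih =>
    intro hj
    have h1 : j.toNat < l.length := by omega
    have h2 : j.toNat + 1 < l.length := by omega
    have hg1 : PySem.List.pyGetD l j 0 = l[j.toNat] := PySem.List.pyGetD_eq_getElem l 0 hj (by omega)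
    have hg2 : PySem.List.pyGetD l (j + 1) 0 = l[j.toNat + 1] := by
      have := PySem.List.pyGetD_eq_getElem l (i := j + 1) 0 (by omega) (by omega)
      simpa [show (j + 1).toNat = j.toNat + 1 by omega] using this
    have hdv : d = l[j.toNat + 1] - l[j.toNat] := by simp only [d, hg1, hg2]
    rw [ih (by omega), List.drop_eq_getElem_cons h1, List.drop_eq_getElem_cons h2,
        show (j + 1).toNat = j.toNat + 1 by omega, List.drop_eq_getElem_cons h2]
    rw [hdv] at hge
    simp only [pairFold]
    rw [if_neg (by omega)]
  case case3 j m lo hi h =>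
    intro hj
    have hlen : (l.drop j.toNat).length ≤ 1 := by
      simp only [List.length_drop]
      omega
    rcases e : l.drop j.toNat with _ | ⟨x, t⟩
    · simp [pairFold]
    · have ht : t = [] := by
        rw [e] at hlen
        simpa using hlen
      subst ht
      simp [pairFold]
theorem setTrue_getD (c : Array Bool) (i k : Nat) :
    (c.setIfInBounds i true).getD k false = true ↔ (i = k ∧ k < c.size) ∨ c.getD k false = true := by
  simp only [Array.getD_eq_getD_getElem?, Array.getElem?_setIfInBounds]
  split_ifs with hik hsz
  · subst hik
    simp [hsz]
  · subst hik
    simp [hsz]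
  · constructor
    · exact fun h => Or.inr h
    · rintro (⟨heq, _⟩ | h)
      · exact absurd heq hik
      · exact h

theorem size_foldl_set (l : List Int) (c : Array Bool) :
    (l.foldl (fun c m => c.setIfInBounds m.toNat true) c).size = c.size := by
  induction l generalizing c with
  | nil => rfl
  | cons m t ih => rw [List.foldl_cons, ih, Array.size_setIfInBounds]

theorem getD_foldl_set_iff (l : List Int) (c : Array Bool) (k : Nat) :
    ((l.foldl (fun c m => c.setIfInBounds m.toNat true) c).getD k false = true) ↔
      c.getD k false = true ∨ ∃ m ∈ l, m.toNat = k ∧ k < c.size := by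
  induction l generalizing c with
  | nil => simp
  | cons m t ih =>
    rw [List.foldl_cons, ih, setTrue_getD, Array.size_setIfInBounds]
    simp only [List.mem_cons, exists_eq_or_imp]
    tauto

theorem size_foldl_sieveStep (n : Int) (l : List Int) (c : Array Bool) :
    (l.foldl (sieveStep n) c).size = c.size := by
  induction l generalizing c with
  | nil => rfl
  | cons i t ih =>
    rw [List.foldl_cons, ih]
    unfold sieveStep
    split
    · rfl
    · exact size_foldl_set _ _

theorem getD_foldl_sieveStep_mono (n : Int) (l : List Int) (c : Array Bool) (k : Nat)
    (hk : c.getD k false = true) : (l.foldl (sieveStep n) c).getD k false = true := by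
  induction l generalizing c with
  | nil => exact hk
  | cons i t ih =>
    refine ih _ ?_
    unfold sieveStep
    split
    · exact hk
    · exact (getD_foldl_set_iff _ _ _).mpr (Or.inl hk)

theorem marked_of_getD_foldl_sieveStep (n : Int) (l : List Int) (c : Array Bool)
    (hl : ∀ i ∈ l, 2 ≤ i) (hc : ∀ k : Nat, c.getD k false = true → Marked n (k : Int)) :
    ∀ k : Nat, (l.foldl (sieveStep n) c).getD k false = true → Marked n (k : Int) := by
  induction l generalizing c with
  | nil => exact hc
  | cons i t ih =>
    refine ih _ (fun a ha => hl a (List.mem_cons_of_mem i ha)) ?_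
    have hi : 2 ≤ i := hl i List.mem_cons_self
    intro k hk
    unfold sieveStep at hk
    split at hk
    · exact hc k hk
    · rcases (getD_foldl_set_iff _ _ _).mp hk with h | ⟨m, hm, hmk, _⟩
      · exact hc k h
      · rw [PySem.List.mem_pyRange_iff_of_pos (by omega)] at hm
        obtain ⟨h2i, hlt, e, he⟩ := hm
        have hmk' : (k : Int) = m := by omega
        rw [hmk']
        exact ⟨i, e + 2, hi, by nlinarith, by linarith [he], by omega⟩

theorem marked_of_getD_sieveComp (n : Int) (k : Nat) (hk : (sieveComp n).getD k false = true) :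
    Marked n (k : Int) := by
  refine marked_of_getD_foldl_sieveStep n _ _ ?_ ?_ k hk
  · intro i hi; rw [PySem.List.mem_pyRange_one] at hi; omega
  · intro k hk
    rw [Array.getD_eq_getD_getElem?] at hk
    rcases h : (Array.replicate (n + 1).toNat false)[k]? with _ | b
    · rw [h] at hk; simp at hk
    · rw [h] at hk
      have h2 := Array.getElem?_replicate (n := (n + 1).toNat) (v := false) (i := k)
      rw [h] at h2
      split at h2
      · simp only [Option.getD_some] at hk
        rw [hk] at h2
        cases h2
      · cases h2

theorem getD_sieveComp_of_marked (n x : Int) (hm : Marked n x) :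
    (sieveComp n).getD x.toNat false = true := by
  obtain ⟨a, b, ha, hb, rfl, hn⟩ := hm
  have hx4 : 4 ≤ a * b := by nlinarith
  have hex : ∃ f : Nat, 2 ≤ f ∧ (f : Int) ∣ a * b := ⟨a.toNat, by omega, by
    rw [show ((a.toNat : Int)) = a by omega]; exact Dvd.intro b rfl⟩
  obtain ⟨d, ⟨hd2, hdvd⟩, hmin⟩ :
      ∃ d : Nat, (2 ≤ d ∧ (d : Int) ∣ a * b) ∧ ∀ f : Nat, f < d → ¬ (2 ≤ f ∧ (f : Int) ∣ a * b) :=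
    ⟨Nat.find hex, Nat.find_spec hex, fun f hf => Nat.find_min hex hf⟩
  obtain ⟨c, hc⟩ := hdvd
  have hdpos : (0 : Int) < d := by positivity
  have hadvd : ((a.toNat : Int)) ∣ a * b := by
    rw [show ((a.toNat : Int)) = a by omega]; exact Dvd.intro b rfl
  have hc2 : 2 ≤ c := by
    by_contra hcle
    have hc1 : c = 1 := by nlinarith
    have had : a < (d : Int) := by nlinarith
    exact hmin a.toNat (by omega) ⟨by omega, hadvd⟩
  have hdc : (d : Int) ≤ c := by
    by_contra hgt
    refine hmin c.toNat (by omega) ⟨by omega, ⟨d, ?_⟩⟩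
    rw [hc, show ((c.toNat : Int)) = c by omega]; ring
  have hdnotprod : ∀ u v : Int, 2 ≤ u → 2 ≤ v → (d : Int) ≠ u * v := by
    intro u v hu hv heq
    have hud : u < (d : Int) := by nlinarith
    refine hmin u.toNat (by omega) ⟨by omega, ?_⟩
    rw [show ((u.toNat : Int)) = u by omega]
    exact dvd_trans ⟨v, heq⟩ ⟨c, hc⟩
  have hdn : (d : Int) ≤ n := by nlinarith
  have htest1 : (2 : Int) ≤ (d : Int) := by omega
  have htest2 : (d : Int) ≤ n + 1 := by omega
  have htest3 : (d : Int) < n + 1 := by omega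
  have hsplit : PySem.List.pyRange 2 (n + 1) 1 =
      PySem.List.pyRange 2 (d : Int) 1 ++ (d : Int) :: PySem.List.pyRange ((d : Int) + 1) (n + 1) 1 := by
    rw [PySem.List.pyRange_one_append 2 (d : Int) (n + 1) htest1 htest2,
        PySem.List.pyRange_one_cons htest3]
  unfold sieveComp
  rw [hsplit, List.foldl_append]
  simp only [List.foldl_cons]
  apply getD_foldl_sieveStep_mono
  set S0 := (PySem.List.pyRange 2 (d : Int) 1).foldl (sieveStep n) (Array.replicate (n + 1).toNat false) with hS0
  have hS0marked : ∀ k : Nat, S0.getD k false = true → Marked n (k : Int) := by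
    rw [hS0]
    refine marked_of_getD_foldl_sieveStep n _ _ ?_ ?_
    · intro i hi; rw [PySem.List.mem_pyRange_one] at hi; omega
    · intro k hk
      exfalso
      rw [Array.getD_eq_getD_getElem?, Array.getElem?_replicate] at hk
      split at hk <;> simp at hk
  have hS0size : S0.size = (n + 1).toNat := by
    rw [hS0, size_foldl_sieveStep, Array.size_replicate]
  have hdnot : ¬ (S0.getD ((d : Int)).toNat false = true) := by
    intro hcontains
    rw [show ((d : Int)).toNat = d by omega] at hcontains
    obtain ⟨u, v, hu, hv, huv, _⟩ := hS0marked d hcontains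
    exact hdnotprod u v hu hv huv
  unfold sieveStep
  rw [if_neg hdnot]
  refine (getD_foldl_set_iff _ _ _).mpr (Or.inr ⟨a * b, ?_, rfl, ?_⟩)
  · rw [PySem.List.mem_pyRange_iff_of_pos (by omega)]
    refine ⟨by nlinarith, by omega, ⟨c - 2, ?_⟩⟩
    rw [hc]; ring
  · rw [hS0size]
    omega

theorem filter_sieve_eq_primes (n : Int) :
    (PySem.List.pyRange 2 (n + 1) 1).filter (fun i => !((sieveComp n).getD i.toNat false)) =
      primesUpTo n := by
  unfold primesUpTo
  apply List.filter_congr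
  intro i hi
  rw [PySem.List.mem_pyRange_one] at hi
  have hcast : ((i.toNat : Int)) = i := by omega
  have hmem : (sieveComp n).getD i.toNat false = true ↔ pyIsPrime i = false := by
    rw [pyIsPrime_eq_false_iff i (by omega)]
    constructor
    · intro h
      obtain ⟨a, b, ha, hb, hab, _⟩ := marked_of_getD_sieveComp n i.toNat h
      exact ⟨a, b, ha, hb, by omega⟩
    · rintro ⟨a, b, ha, hb, hab⟩
      exact getD_sieveComp_of_marked n i ⟨a, b, ha, hb, hab, by omega⟩
  cases hc : (sieveComp n).getD i.toNat false
  · cases hp : pyIsPrime i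
    · have := hmem.mpr hp
      rw [hc] at this
      exact absurd this (by simp)
    · rfl
  · rw [hmem.mp hc]
    rfl

theorem foldl_gapUpd_ne (l : List Int) (p m lo hi : Int) (hp : p ≠ -1) (hl : ∀ x ∈ l, x ≠ -1) :
    [(l.foldl gapUpd (p, m, lo, hi)).2.2.1, (l.foldl gapUpd (p, m, lo, hi)).2.2.2] = pairFold (p :: l) m lo hi := by
  induction l generalizing p m lo hi with
  | nil => simp [pairFold]
  | cons x t ih =>
    have hx : x ≠ -1 := hl x List.mem_cons_self
    have ht : ∀ y ∈ t, y ≠ -1 := fun y hy => hl y (List.mem_cons_of_mem x hy)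
    simp only [List.foldl_cons]
    by_cases hcond : m < x - p
    · rw [show gapUpd (p, m, lo, hi) x = (x, x - p, p, x) from by simp [gapUpd, hp, hcond]]
      rw [ih x (x - p) p x hx ht]
      simp only [pairFold]
      rw [if_pos hcond]
    · rw [show gapUpd (p, m, lo, hi) x = (x, m, lo, hi) from by
        simp only [gapUpd]; rw [if_neg (by simp [hp, hcond])]]
      rw [ih x m lo hi hx ht]
      simp only [pairFold]
      rw [if_neg hcond]

theorem foldl_gapUpd_start (l : List Int) (hl : ∀ x ∈ l, x ≠ -1) :
    [(l.foldl gapUpd ((-1 : Int), 0, 0, 0)).2.2.1, (l.foldl gapUpd ((-1 : Int), 0, 0, 0)).2.2.2] = pairFold l 0 0 0 := by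
  cases l with
  | nil => simp [pairFold]
  | cons x t =>
    have hx : x ≠ -1 := hl x List.mem_cons_self
    simp only [List.foldl_cons]
    rw [show gapUpd (-1, 0, 0, 0) x = (x, 0, 0, 0) from by simp [gapUpd]]
    have := foldl_gapUpd_ne t x 0 0 0 hx (fun y hy => hl y (List.mem_cons_of_mem x hy))
    rw [this]
theorem main_eq (n : Int) : farthestConsecutivePrimes n = farthestConsecutivePrimes_alt n := by
  unfold farthestConsecutivePrimes farthestConsecutivePrimes_alt
  rw [buildPrimes_eq, gapLoop_eq_pairFold _ 0 0 0 0 le_rfl]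
  simp only [List.nil_append, Int.toNat_zero, List.drop_zero]
  by_cases h2 : n < 2
  · rw [if_pos h2, PySem.List.pyRange_one_eq_nil (by omega)]
    simp [pairFold]
  · rw [if_neg h2]
    show _ = [((PySem.List.pyRange 2 (n + 1) 1).foldl (gapStep (sieveComp n)) (-1, 0, 0, 0)).2.2.1,
              ((PySem.List.pyRange 2 (n + 1) 1).foldl (gapStep (sieveComp n)) (-1, 0, 0, 0)).2.2.2]
    have hconv : (PySem.List.pyRange 2 (n + 1) 1).foldl (gapStep (sieveComp n)) (-1, 0, 0, 0) =
        (PySem.List.pyRange 2 (n + 1) 1).foldl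
          (fun st i => if (!((sieveComp n).getD i.toNat false)) then gapUpd st i else st) (-1, 0, 0, 0) := by
      apply PySem.List.foldl_congr_mem
      intro st i _
      show (if (sieveComp n).getD i.toNat false then st else gapUpd st i) = _
      cases (sieveComp n).getD i.toNat false <;> rfl
    rw [hconv, PySem.List.foldl_if_eq_foldl_filter, filter_sieve_eq_primes]
    have hne : ∀ x ∈ primesUpTo n, x ≠ -1 := by
      intro x hx
      have := List.mem_of_mem_filter hx
      rw [PySem.List.mem_pyRange_one] at this
      omega
    rw [foldl_gapUpd_start (primesUpTo n) hne]
    rfl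

-- ===== VERDICT (by name: the statement is the Claim_ definition above) =====
theorem farthestConsecutivePrimes_spec : Claim_equal_farthestConsecutivePrimes := by
  intro n _
  unfold Spec_farthestConsecutivePrimes
  exact main_eq n
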